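-- pv_equiv track=rewrite | github.com/solomonsh/Problem-Solving | Sorting/Counting Triangles/counting_triangles.py | counting_triangles
-- ===== SOURCE A (Python) =====
-- def counting_triangles(arr):
--     for i in range(len(arr)):
--         arr[i] = sorted(arr[i])
--
--     unique_triangle = []
--     for triangle in arr:
--         if triangle not in unique_triangle:
--             unique_triangle.append(triangle)
--     return len(unique_triangle)
-- ===== SOURCE B (Python) =====
-- def counting_triangles(arr):
--     # same in-place normalization side effect as the original (arr[i] becomes sorted(arr[i]))
--     arr[:] = [sorted(t) for t in arr]
--     count = 0
--     prev = None
--     for t in sorted(arr):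
--         if prev is None or t != prev:
--             count += 1
--         prev = t
--     return count
-- ===== Notes on version B (the rewrite author's own statement) =====
-- stated objective: alternative
-- what changed: Replaces the membership-scan deduplication (list 'in' check against the growing unique list) with sorting the normalized triangles once and counting elements that differ from their predecessor in one linear pass; the in-place normalization side effect on arr is preserved.
import Mathlib
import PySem

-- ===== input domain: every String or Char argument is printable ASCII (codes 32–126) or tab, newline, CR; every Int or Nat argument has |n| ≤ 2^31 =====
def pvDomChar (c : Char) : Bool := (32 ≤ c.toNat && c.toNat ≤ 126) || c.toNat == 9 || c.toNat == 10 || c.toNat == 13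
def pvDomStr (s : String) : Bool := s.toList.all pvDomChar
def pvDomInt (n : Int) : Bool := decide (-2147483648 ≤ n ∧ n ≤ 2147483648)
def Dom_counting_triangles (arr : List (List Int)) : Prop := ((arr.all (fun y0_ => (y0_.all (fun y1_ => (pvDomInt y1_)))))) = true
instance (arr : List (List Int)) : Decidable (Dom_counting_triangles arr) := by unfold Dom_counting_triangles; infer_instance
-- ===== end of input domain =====

-- B sorts the normalized triangles once and counts adjacent changes instead of A's
-- membership-scan dedup; the equivalence proved is about the return value (both Pythons perform
-- the same in-place normalization of arr).

-- ===== PORT A =====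
def counting_triangles (arr : List (List Int)) : Int :=
  -- for i in range(len(arr)): arr[i] = sorted(arr[i])   (i always in range, so pySetD/pyGetD are exact)
  let arr2 := (PySem.List.pyRange 0 arr.length 1).foldl
    (fun a i => PySem.List.pySetD a i (PySem.List.sorted (PySem.List.pyGetD a i []) (fun x => x) false)) arr
  -- unique_triangle = []; for triangle in arr: if triangle not in unique_triangle: append
  let unique := arr2.foldl (fun u t => if t ∈ u then u else u ++ [t]) ([] : List (List Int))
  (unique.length : Int)

-- ===== PORT B =====
-- one step of B's adjacent-change counter: (prev, count) updated by the next triangle t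
def bstep (st : Option (List Int) × Int) (t : List Int) : Option (List Int) × Int :=
  (some t, if st.1 = none ∨ st.1 ≠ some t then st.2 + 1 else st.2)

def counting_triangles_alt (arr : List (List Int)) : Int :=
  -- arr[:] = [sorted(t) for t in arr]
  let arr2 := arr.map (fun t => PySem.List.sorted t (fun x => x) false)
  -- count = 0; prev = None; for t in sorted(arr): if prev is None or t != prev: count += 1; prev = t
  let r := (PySem.List.sorted arr2 (fun x => x) false).foldl bstep
    ((none, 0) : Option (List Int) × Int)
  r.2

-- ===== PRECONDITION & SPEC =====
def Spec_counting_triangles (arr : List (List Int)) (out : Int) : Prop := out = counting_triangles_alt arr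
instance (arr : List (List Int)) (out : Int) : Decidable (Spec_counting_triangles arr out) := by unfold Spec_counting_triangles; infer_instance

-- ===== CLAIM (what is proved, stated in full; the proofs are below) =====
def Claim_equal_counting_triangles : Prop := ∀ (arr : List (List Int)), Dom_counting_triangles arr → Spec_counting_triangles arr (counting_triangles arr)

-- ===== LEMMAS AND PROOFS =====

-- A's index loop `arr[i] = sorted(arr[i])` produces exactly the map of the normalizer.
theorem foldl_set_norm (f : List Int → List Int) :
    ∀ (m k : Nat) (a : List (List Int)), a.length = k + m →
      (List.range' k m).foldl (fun b i => b.set i (f (b.getD i []))) a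
        = a.take k ++ (a.drop k).map f := by
  intro m
  induction m with
  | zero =>
    intro k a h
    have hle : a.length ≤ k := by omega
    simp [List.range', List.take_of_length_le hle, List.drop_eq_nil_of_le, hle]
  | succ m ih =>
    intro k a h
    have hk : k < a.length := by omega
    rw [List.range'_succ, List.foldl_cons]
    have hset : a.set k (f (a.getD k [])) = a.take k ++ f a[k] :: a.drop (k + 1) := by
      rw [List.getD_eq_getElem a [] hk, List.set_eq_take_append_cons_drop, if_pos hk]
    rw [hset, ih (k + 1) _ (by simp; omega)]
    have hlen : (a.take k).length = k := by simp [Nat.min_eq_left (le_of_lt hk)]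
    have h1 : ∀ (l1 l2 : List (List Int)) (x : List Int), l1.length = k →
        (l1 ++ x :: l2).take (k + 1) = l1 ++ [x] := by
      intro l1 l2 x hl; subst hl; simp [List.take_append]
    have h2 : ∀ (l1 l2 : List (List Int)) (x : List Int), l1.length = k →
        (l1 ++ x :: l2).drop (k + 1) = l2 := by
      intro l1 l2 x hl; subst hl; simp [List.drop_append]
    rw [h1 _ _ _ hlen, h2 _ _ _ hlen, List.drop_eq_getElem_cons hk, List.map_cons,
      List.append_assoc, List.singleton_append]

-- A's dedup loop counts the distinct elements of the scanned list.
theorem dedup_count :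
    ∀ (s u : List (List Int)), u.Nodup →
      ((s.foldl (fun u t => if t ∈ u then u else u ++ [t]) u).length : Int)
        = ((u.toFinset ∪ s.toFinset).card : Int) := by
  intro s
  induction s with
  | nil => intro u hu; simp [List.toFinset_card_of_nodup hu]
  | cons t s ih =>
    intro u hu
    by_cases ht : t ∈ u
    · rw [List.foldl_cons, if_pos ht, ih u hu]
      have hu2 : u.toFinset ∪ (t :: s).toFinset = u.toFinset ∪ s.toFinset := by
        ext x
        simp only [Finset.mem_union, List.mem_toFinset, List.mem_cons]
        constructor
        · rintro (hx | rfl | hx)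
          · exact Or.inl hx
          · exact Or.inl ht
          · exact Or.inr hx
        · rintro (hx | hx)
          · exact Or.inl hx
          · exact Or.inr (Or.inr hx)
      rw [hu2]
    · have hnd : (u ++ [t]).Nodup :=
        hu.append (List.nodup_singleton t)
          (fun a hau hat => absurd hau (by simp at hat; exact hat ▸ ht))
      rw [List.foldl_cons, if_neg ht, ih (u ++ [t]) hnd]
      have hu2 : (u ++ [t]).toFinset ∪ s.toFinset = u.toFinset ∪ (t :: s).toFinset := by
        ext x; simp
      rw [hu2]

-- B's counter over a sorted tail, with a previous element below the tail.
theorem bcount_some :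
    ∀ (s : List (List Int)) (p : List Int) (c : Int),
      s.Pairwise (· ≤ ·) → (∀ x ∈ s, p ≤ x) →
      (s.foldl bstep (some p, c)).2 = c + ((s.toFinset.erase p).card : Int) := by
  intro s
  induction s with
  | nil => intro p c _ _; simp
  | cons a s ih =>
    intro p c hpw hp
    have hpw' := (List.pairwise_cons.mp hpw).2
    have ha : ∀ x ∈ s, a ≤ x := (List.pairwise_cons.mp hpw).1
    have hpa : p ≤ a := hp a (by simp)
    by_cases hpe : p = a
    · subst hpe
      rw [List.foldl_cons]
      have hb : bstep (some p, c) p = (some p, c) := by simp [bstep]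
      rw [hb, ih p c hpw' ha]
      simp [Finset.erase_insert_eq_erase]
    · have hlt : p < a := lt_of_le_of_ne hpa hpe
      have hpns : p ∉ s.toFinset := by
        intro hmem
        exact absurd (ha p (List.mem_toFinset.mp hmem)) (not_le.mpr hlt)
      rw [List.foldl_cons]
      have hb : bstep (some p, c) a = (some a, c + 1) := by simp [bstep, hpe]
      rw [hb, ih a (c + 1) hpw' ha]
      have herase : ((a :: s).toFinset).erase p = insert a s.toFinset := by
        rw [List.toFinset_cons]
        apply Finset.erase_eq_of_notMem
        simp only [Finset.mem_insert, List.mem_toFinset]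
        rintro (rfl | hmem)
        · exact hpe rfl
        · exact hpns (List.mem_toFinset.mpr hmem)
      rw [herase]
      by_cases has : a ∈ s.toFinset
      · have h1 : insert a s.toFinset = s.toFinset := Finset.insert_eq_self.mpr has
        have h2 : (s.toFinset.erase a).card + 1 = s.toFinset.card :=
          Finset.card_erase_add_one has
        rw [h1]
        push_cast [← h2]
        ring
      · have h1 : s.toFinset.erase a = s.toFinset := Finset.erase_eq_of_notMem has
        rw [h1, Finset.card_insert_of_notMem has]
        push_cast
        ring

-- B's full pass over a sorted list counts its distinct elements.
theorem bcount_none (s : List (List Int)) (h : s.Pairwise (· ≤ ·)) :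
    (s.foldl bstep (none, 0)).2 = (s.toFinset.card : Int) := by
  cases s with
  | nil => simp
  | cons a s =>
    have hpw' := (List.pairwise_cons.mp h).2
    have ha := (List.pairwise_cons.mp h).1
    rw [List.foldl_cons]
    have hb : bstep (none, 0) a = (some a, 1) := by simp [bstep]
    rw [hb, bcount_some s a 1 hpw' ha]
    by_cases has : a ∈ s.toFinset
    · have h1 : insert a s.toFinset = s.toFinset := Finset.insert_eq_self.mpr has
      have h2 : (s.toFinset.erase a).card + 1 = s.toFinset.card :=
        Finset.card_erase_add_one has
      simp only [List.toFinset_cons, h1]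
      push_cast [← h2]
      ring
    · have h1 : s.toFinset.erase a = s.toFinset := Finset.erase_eq_of_notMem has
      simp only [List.toFinset_cons, h1, Finset.card_insert_of_notMem has]
      push_cast
      ring

-- the two elaborations of Python's list-of-lists ordering (core LT vs LinearOrder) sort identically
theorem sorted_inst (ns : List (List Int)) :
    PySem.List.sorted ns (fun x => x) false
      = @PySem.List.sorted (List Int) (List Int) List.instLinearOrder.toLT
          LinearOrder.toDecidableLT ns (fun x => x) false := by
  congr 1

-- ===== VERDICT (by name: the statement is the Claim_ definition above) =====
theorem counting_triangles_spec : Claim_equal_counting_triangles := by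
  intro arr _
  unfold Spec_counting_triangles counting_triangles counting_triangles_alt
  have hnorm :
      (PySem.List.pyRange 0 arr.length 1).foldl
        (fun a i => PySem.List.pySetD a i (PySem.List.sorted (PySem.List.pyGetD a i []) (fun x => x) false)) arr
        = arr.map (fun t => PySem.List.sorted t (fun x => x) false) := by
    rw [PySem.List.pyRange_one]
    simp only [List.foldl_map, zero_add, Int.sub_zero, Int.toNat_natCast,
      PySem.List.pySetD_natCast, PySem.List.pyGetD_natCast]
    rw [List.range_eq_range']
    simpa using foldl_set_norm (fun t => PySem.List.sorted t (fun x => x) false) arr.length 0 arr (by omega)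
  show ((((PySem.List.pyRange 0 arr.length 1).foldl
        (fun a i => PySem.List.pySetD a i (PySem.List.sorted (PySem.List.pyGetD a i []) (fun x => x) false)) arr).foldl
        (fun u t => if t ∈ u then u else u ++ [t]) ([] : List (List Int))).length : Int)
      = ((PySem.List.sorted (arr.map (fun t => PySem.List.sorted t (fun x => x) false)) (fun x => x) false).foldl
          bstep ((none, 0) : Option (List Int) × Int)).2
  have hs : (PySem.List.sorted (arr.map (fun t => PySem.List.sorted t (fun x => x) false))
      (fun x => x) false).Pairwise (· ≤ ·) := by
    rw [sorted_inst]
    exact PySem.List.sorted_pairwise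
      (arr.map (fun t => PySem.List.sorted t (fun x => x) false)) (fun x => x)
  have hperm := List.toFinset_eq_of_perm _ _
    (PySem.List.sorted_perm (arr.map (fun t => PySem.List.sorted t (fun x => x) false)) (fun x => x) false)
  calc ((((PySem.List.pyRange 0 arr.length 1).foldl
        (fun a i => PySem.List.pySetD a i (PySem.List.sorted (PySem.List.pyGetD a i []) (fun x => x) false)) arr).foldl
        (fun u t => if t ∈ u then u else u ++ [t]) ([] : List (List Int))).length : Int)
      = (((arr.map (fun t => PySem.List.sorted t (fun x => x) false)).toFinset).card : Int) := by
        rw [hnorm, dedup_count _ [] List.nodup_nil]; simp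
    _ = ((PySem.List.sorted (arr.map (fun t => PySem.List.sorted t (fun x => x) false)) (fun x => x) false).foldl
          bstep ((none, 0) : Option (List Int) × Int)).2 :=
        by rw [← hperm]; exact (bcount_none _ hs).symm
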